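-- pv_equiv track=rewrite | github.com/arpan-svci/BCSE-III-CN-Assignments | Computer_networks_1/lrc.py | lrc_decoding
-- ===== SOURCE A (Python) =====
-- def lrc_decoding(codeword,length):
--     data=[]
--     number=0
--     len_codeword=len(codeword)
--     buffer=len_codeword-length
--     pairity=codeword[buffer:len_codeword]
--     for i in range(0,buffer,length):
--         if(i<=buffer-length):
--             data.append(codeword[i:i+length])
--             number+=1
--         else:
--             data.append(('0'*(length-(buffer-i)))+codeword[i:buffer])
--             number+=1
--     status='correct'
--     for i in range(0,length):
--         one=0
--         k=''
--         for j in range(0,number):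
--             if(data[j][i]=='1'):
--                 one+=1
--         if(one%2==0):
--             k='0'
--         else:
--             k='1'
--         if(pairity[i]!=k):
--             status='error'
--             break
--     return status
-- ===== SOURCE B (Python) =====
-- def lrc_decoding(codeword, length):
--     # Row-major parity accumulation: XOR each data block into an accumulator,
--     # then compare the whole accumulator with the parity block at once.
--     n = len(codeword)
--     buffer = n - length
--     parity = codeword[buffer:n]
--     size = max(length, 0)
--     if len(parity) != size:
--         return 'error'
--     acc = ['0'] * size
--     for i in range(0, buffer, length):
--         block = codeword[i:min(i + length, buffer)]
--         p = length - len(block)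
--         for c in block:
--             if c == '1':
--                 acc[p] = '1' if acc[p] == '0' else '0'
--             p += 1
--     return 'correct' if ''.join(acc) == parity else 'error'
-- ===== Notes on version B (the rewrite author's own statement) =====
-- stated objective: alternative
-- what changed: A counts ones column-by-column (columns outer, data blocks inner, with an early break on the first parity mismatch); B makes one row-major pass, XOR-folding each data block into a parity accumulator, and compares the whole accumulator against the parity block at the end.
import Mathlib
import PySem

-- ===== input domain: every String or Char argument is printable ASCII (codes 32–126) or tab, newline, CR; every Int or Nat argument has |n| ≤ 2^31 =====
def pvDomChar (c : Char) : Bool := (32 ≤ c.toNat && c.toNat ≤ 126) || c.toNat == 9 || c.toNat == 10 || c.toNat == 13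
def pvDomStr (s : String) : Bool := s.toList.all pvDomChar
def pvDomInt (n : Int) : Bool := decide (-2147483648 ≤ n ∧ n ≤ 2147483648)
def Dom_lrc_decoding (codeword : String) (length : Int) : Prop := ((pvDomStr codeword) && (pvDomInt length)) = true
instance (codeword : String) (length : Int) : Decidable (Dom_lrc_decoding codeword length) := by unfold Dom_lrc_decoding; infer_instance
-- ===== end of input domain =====

-- B re-implements A's column-major one-counting as a row-major XOR accumulation with a single
-- whole-string compare at the end (alternative decomposition, same asymptotic cost).

-- ===== PORT A =====
-- the block-building loop of A: state (data, number)
def lrcBuild (cs : List Char) (buffer length : Int) : List (List Char) × Int :=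
  (PySem.List.pyRange 0 buffer length).foldl (fun s i =>
    if i ≤ buffer - length then
      (s.1 ++ [PySem.List.slice cs (some i) (some (i + length))], s.2 + 1)
    else
      (s.1 ++ [PySem.List.pyRepeat ['0'] (length - (buffer - i)) ++ PySem.List.slice cs (some i) (some buffer)], s.2 + 1))
    ([], 0)

-- the checking loop of A: break on first parity mismatch
def lrcCheck (data : List (List Char)) (number : Int) (pairity : List Char) (length i : Int) : String :=
  if h : i < length then
    let one : Int := (PySem.List.pyRange 0 number 1).foldl
      (fun one j => if PySem.List.pyGetD (PySem.List.pyGetD data j []) i '?' = '1' then one + 1 else one) 0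
    let k : Char := if PySem.Int.mod one 2 = 0 then '0' else '1'
    if PySem.List.pyGetD pairity i '?' ≠ k then "error" else lrcCheck data number pairity length (i + 1)
  else "correct"
termination_by (length - i).toNat
decreasing_by omega

def lrc_decoding (codeword : String) (length : Int) : String :=
  let cs := codeword.toList
  let len_codeword : Int := cs.length
  let buffer := len_codeword - length
  let pairity := PySem.List.slice cs (some buffer) (some len_codeword)
  let dn := lrcBuild cs buffer length
  lrcCheck dn.1 dn.2 pairity length 0

-- ===== PORT B =====
-- the inner loop of B: XOR a block into acc starting at position p
def lrcInner : List Char → Int → List Char → List Char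
  | acc, _, [] => acc
  | acc, p, c :: rest =>
    lrcInner
      (if c = '1' then
        PySem.List.pySetD acc p (if PySem.List.pyGetD acc p '?' = '0' then '1' else '0')
      else acc) (p + 1) rest

def lrc_decoding_alt (codeword : String) (length : Int) : String :=
  let cs := codeword.toList
  let n : Int := cs.length
  let buffer := n - length
  let parity := PySem.List.slice cs (some buffer) (some n)
  let size := max length 0
  if (parity.length : Int) ≠ size then "error"
  else
    let acc0 : List Char := PySem.List.pyRepeat ['0'] size
    let acc := (PySem.List.pyRange 0 buffer length).foldl (fun acc i =>
        let block := PySem.List.slice cs (some i) (some (min (i + length) buffer))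
        lrcInner acc (length - (block.length : Int)) block) acc0
    if acc = parity then "correct" else "error"

-- ===== PRECONDITION & SPEC =====
-- Pre_ excludes exactly the inputs where A raises: length == 0 (range step 0, ValueError) and
-- length > len(codeword) with the (short) parity slice all '0' (IndexError running past it).
def Pre_lrc_decoding (codeword : String) (length : Int) : Prop :=
  length ≠ 0 ∧
    (length ≤ (codeword.toList.length : Int) ∨
      (codeword.toList.drop (2 * codeword.toList.length - length).toNat).any (fun c => c != '0') = true)
instance (codeword : String) (length : Int) : Decidable (Pre_lrc_decoding codeword length) := by
  unfold Pre_lrc_decoding; infer_instance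
def pvWitness_lrc_decoding : String × Int := ("110011", 2)

def Spec_lrc_decoding (codeword : String) (length : Int) (out : String) : Prop := out = lrc_decoding_alt codeword length
instance (codeword : String) (length : Int) (out : String) : Decidable (Spec_lrc_decoding codeword length out) := by unfold Spec_lrc_decoding; infer_instance

-- ===== CLAIM (what is proved, stated in full; the proofs are below) =====
def Claim_equal_lrc_decoding : Prop := ∀ (codeword : String) (length : Int), Dom_lrc_decoding codeword length → Pre_lrc_decoding codeword length → Spec_lrc_decoding codeword length (lrc_decoding codeword length)

-- ===== LEMMAS AND PROOFS =====

def flipc (c : Char) : Char := if c = '0' then '1' else '0'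
def comb (acc blk : List Char) : List Char :=
  List.zipWith (fun a c => if c = '1' then flipc a else a) acc blk
def blockA (cs : List Char) (buffer length i : Int) : List Char :=
  if i ≤ buffer - length then PySem.List.slice cs (some i) (some (i + length))
  else PySem.List.pyRepeat ['0'] (length - (buffer - i)) ++ PySem.List.slice cs (some i) (some buffer)

lemma flipc_flipc (a : Char) (h : a = '0' ∨ a = '1') : flipc (flipc a) = a := by
  rcases h with h | h <;> simp [flipc, h]

lemma comb_zeros : ∀ (pre : List Char), comb pre (List.replicate pre.length '0') = pre := by
  intro pre
  induction pre with
  | nil => rfl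
  | cons a t ih => simp [comb, List.replicate, flipc] at ih ⊢; exact ih

lemma comb_pad (pre suf s : List Char) :
    comb (pre ++ suf) (List.replicate pre.length '0' ++ s) = pre ++ comb suf s := by
  unfold comb
  rw [List.zipWith_append (h := by simp)]
  rw [show List.zipWith (fun a c => if c = '1' then flipc a else a) pre (List.replicate pre.length '0') = comb pre (List.replicate pre.length '0') from rfl, comb_zeros]

lemma length_comb (acc blk : List Char) (h : blk.length = acc.length) :
    (comb acc blk).length = acc.length := by
  simp [comb, h]

lemma comb_getD (acc blk : List Char) (h : blk.length = acc.length) (p : Nat) (hp : p < acc.length) :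
    (comb acc blk).getD p '?' = if blk.getD p '?' = '1' then flipc (acc.getD p '?') else acc.getD p '?' := by
  rw [List.getD_eq_getElem _ _ (by simp [comb, h]; omega),
      List.getD_eq_getElem _ _ hp, List.getD_eq_getElem _ _ (by omega)]
  simp [comb, List.getElem_zipWith]

lemma lrcBuild_aux (cs : List Char) (buffer length : Int) :
    ∀ (l : List Int) (d0 : List (List Char)) (n0 : Int),
      l.foldl (fun s i =>
        if i ≤ buffer - length then
          (s.1 ++ [PySem.List.slice cs (some i) (some (i + length))], s.2 + 1)
        else
          (s.1 ++ [PySem.List.pyRepeat ['0'] (length - (buffer - i)) ++ PySem.List.slice cs (some i) (some buffer)], s.2 + 1))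
        (d0, n0)
      = (d0 ++ l.map (blockA cs buffer length), n0 + l.length) := by
  intro l
  induction l with
  | nil => intro d0 n0; simp
  | cons i t ih =>
    intro d0 n0
    simp only [List.foldl_cons, List.map_cons]
    by_cases h : i ≤ buffer - length
    · rw [if_pos h, ih]
      simp [blockA, h]; ring
    · rw [if_neg h, ih]
      simp [blockA, h]; ring

lemma lrcBuild_eq (cs : List Char) (buffer length : Int) :
    lrcBuild cs buffer length =
      ((PySem.List.pyRange 0 buffer length).map (blockA cs buffer length),
       ((PySem.List.pyRange 0 buffer length).length : Int)) := by
  unfold lrcBuild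
  rw [lrcBuild_aux]
  simp

lemma lrcInner_eq : ∀ (block pre suf : List Char), suf.length = block.length →
    lrcInner (pre ++ suf) (pre.length : Int) block = pre ++ comb suf block := by
  intro block
  induction block with
  | nil =>
    intro pre suf h
    have : suf = [] := List.eq_nil_of_length_eq_zero h
    subst this; simp [lrcInner, comb]
  | cons c bs ih =>
    intro pre suf h
    cases suf with
    | nil => simp at h
    | cons s ss =>
      simp only [List.length_cons] at h
      have hget : PySem.List.pyGetD (pre ++ s :: ss) (pre.length : Int) '?' = s := by
        rw [PySem.List.pyGetD_natCast]
        rw [List.getD_eq_getElem _ _ (by simp)]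
        simp
      have hset : ∀ v, PySem.List.pySetD (pre ++ s :: ss) (pre.length : Int) v = pre ++ v :: ss := by
        intro v
        rw [PySem.List.pySetD_natCast]
        rw [List.set_append]
        simp
      set s' : Char := if c = '1' then (if s = '0' then '1' else '0') else s with hs'
      have step : lrcInner (pre ++ s :: ss) (pre.length : Int) (c :: bs)
          = lrcInner ((pre ++ [s']) ++ ss) (((pre ++ [s']).length : Nat) : Int) bs := by
        show lrcInner (if c = '1' then _ else _) _ _ = _
        by_cases hc : c = '1'
        · rw [if_pos hc, hget, hset]
          congr 1
          · simp [hs', hc]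
          · simp
        · rw [if_neg hc]
          congr 1
          · simp [hs', hc]
          · simp
      rw [step, ih (pre ++ [s']) ss (by omega)]
      simp only [comb, List.zipWith_cons_cons, List.append_assoc, List.singleton_append]
      simp [hs', flipc]

lemma foldl_comb_spec : ∀ (D : List (List Char)) (acc : List Char),
    (∀ blk ∈ D, blk.length = acc.length) →
    (∀ q : Nat, q < acc.length → acc.getD q '?' = '0' ∨ acc.getD q '?' = '1') →
    (D.foldl comb acc).length = acc.length ∧
      ∀ p : Nat, p < acc.length →
        (D.foldl comb acc).getD p '?' =
          if Odd (D.countP (fun blk => decide (blk.getD p '?' = '1')))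
          then flipc (acc.getD p '?') else acc.getD p '?' := by
  intro D
  induction D with
  | nil =>
    intro acc _ _
    refine ⟨rfl, ?_⟩
    intro p hp
    simp [Nat.odd_iff]
  | cons blk D ih =>
    intro acc hlen hadm
    have hblk : blk.length = acc.length := hlen blk (by simp)
    have hc : (comb acc blk).length = acc.length := by simp [comb, hblk]
    have hlen' : ∀ b ∈ D, b.length = (comb acc blk).length := by
      intro b hb; rw [hc]; exact hlen b (by simp [hb])
    have hadm' : ∀ q : Nat, q < (comb acc blk).length →
        (comb acc blk).getD q '?' = '0' ∨ (comb acc blk).getD q '?' = '1' := by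
      intro q hq
      rw [hc] at hq
      rw [comb_getD acc blk hblk q hq]
      rcases hadm q hq with h0 | h0 <;> split_ifs <;> simp [flipc] <;> tauto
    obtain ⟨ihl, ihv⟩ := ih (comb acc blk) hlen' hadm'
    refine ⟨by simpa [hc] using ihl, ?_⟩
    intro p hp
    have hp' : p < (comb acc blk).length := by omega
    simp only [List.foldl_cons]
    rw [ihv p hp', comb_getD acc blk hblk p hp]
    rw [List.countP_cons]
    by_cases hhit : blk.getD p '?' = '1'
    · rw [if_pos hhit]
      have hadd : (if decide (blk.getD p '?' = '1') = true then 1 else 0) = 1 := by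
        rw [decide_eq_true hhit]
        exact if_pos rfl
      rw [hadd]
      by_cases hodd : Odd (D.countP (fun blk => decide (blk.getD p '?' = '1')))
      · rw [if_pos hodd,
            if_neg (by simp only [Nat.odd_add_one]; exact not_not_intro hodd),
            flipc_flipc _ (hadm p hp)]
      · rw [if_neg hodd, if_pos (Nat.odd_add_one.mpr hodd)]
    · rw [if_neg hhit]
      have hadd : (if decide (blk.getD p '?' = '1') = true then 1 else 0) = 0 := by
        rw [decide_eq_false hhit]
        exact if_neg (by simp)
      rw [hadd, Nat.add_zero]

lemma lrcCheck_eq_aux (data : List (List Char)) (number : Int) (pairity : List Char) :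
    ∀ (fuel : Nat) (length i : Int), (length - i).toNat = fuel →
      lrcCheck data number pairity length i =
        if (PySem.List.pyRange i length 1).all (fun i =>
            PySem.List.pyGetD pairity i '?' =
              (if PySem.Int.mod ((PySem.List.pyRange 0 number 1).foldl
                  (fun one j => if PySem.List.pyGetD (PySem.List.pyGetD data j []) i '?' = '1' then one + 1 else one) 0) 2 = 0
               then '0' else '1'))
        then "correct" else "error" := by
  intro fuel
  induction fuel with
  | zero =>
    intro length i hf
    rw [lrcCheck]
    rw [dif_neg (by omega)]
    rw [PySem.List.pyRange_one_eq_nil (by omega)]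
    rfl
  | succ n ih =>
    intro length i hf
    rw [lrcCheck]
    by_cases h : i < length
    · rw [dif_pos h, PySem.List.pyRange_one_cons h]
      simp only [List.all_cons]
      by_cases hmatch : PySem.List.pyGetD pairity i '?' =
          (if PySem.Int.mod ((PySem.List.pyRange 0 number 1).foldl
              (fun one j => if PySem.List.pyGetD (PySem.List.pyGetD data j []) i '?' = '1' then one + 1 else one) 0) 2 = 0
           then '0' else '1')
      · rw [if_neg (fun hne => hne hmatch), ih length (i + 1) (by omega)]
        simp only [decide_eq_true hmatch, Bool.true_and]
      · rw [if_pos hmatch]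
        simp only [decide_eq_false hmatch, Bool.false_and]
        simp
    · rw [dif_neg h]
      rw [PySem.List.pyRange_one_eq_nil (by omega)]
      rfl

lemma lrcCheck_eq (data : List (List Char)) (number : Int) (pairity : List Char) (length i : Int) :
    lrcCheck data number pairity length i =
      if (PySem.List.pyRange i length 1).all (fun i =>
          PySem.List.pyGetD pairity i '?' =
            (if PySem.Int.mod ((PySem.List.pyRange 0 number 1).foldl
                (fun one j => if PySem.List.pyGetD (PySem.List.pyGetD data j []) i '?' = '1' then one + 1 else one) 0) 2 = 0
             then '0' else '1'))
      then "correct" else "error" :=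
  lrcCheck_eq_aux data number pairity _ length i rfl

lemma pyRange_neg_step_nil {a b s : Int} (hs : s < 0) (hab : a ≤ b) :
    PySem.List.pyRange a b s = [] := by
  simp only [PySem.List.pyRange]
  rw [if_neg (by omega)]
  rw [if_neg (by omega), if_neg (by omega)]
  rfl

lemma pyRange_pos_step_nil {a b s : Int} (hs : 0 < s) (hba : b ≤ a) :
    PySem.List.pyRange a b s = [] := by
  rw [PySem.List.pyRange_of_pos _ _ hs, if_neg (by omega)]
  rfl

lemma clamp_nonneg (n : Nat) (i : Int) (h0 : 0 ≤ i) (h1 : i ≤ n) :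
    PySem.List.clampIdx n i = i.toNat := by
  simp only [PySem.List.clampIdx]
  split_ifs <;> omega

lemma clamp_neg (n : Nat) (i : Int) (h : i < 0) :
    PySem.List.clampIdx n i = ((n : Int) + i).toNat := by
  simp only [PySem.List.clampIdx]
  split_ifs <;> omega

lemma clamp_big (n : Nat) (i : Int) (h : (n : Int) ≤ i) :
    PySem.List.clampIdx n i = n := by
  simp only [PySem.List.clampIdx]
  split_ifs <;> omega

lemma slice_eq {α : Type} (xs : List α) (a b : Int) :
    PySem.List.slice xs (some a) (some b) =
      (xs.drop (PySem.List.clampIdx xs.length a)).take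
        (PySem.List.clampIdx xs.length b - PySem.List.clampIdx xs.length a) := rfl

lemma blockA_length (cs : List Char) (length i : Int)
    (hpos : 0 < length) (hle : length ≤ (cs.length : Int))
    (h0 : 0 ≤ i) (hib : i < (cs.length : Int) - length) :
    (blockA cs ((cs.length : Int) - length) length i).length = length.toNat := by
  unfold blockA
  split_ifs with hcase
  · rw [PySem.List.slice_toNat cs h0 (by omega)]
    simp only [List.length_take, List.length_drop]
    omega
  · rw [PySem.List.slice_toNat cs h0 (by omega)]
    simp only [List.length_append, List.length_take, List.length_drop,
      PySem.List.pyRepeat_singleton, List.length_replicate]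
    omega

lemma stepB_eq_comb (cs : List Char) (length i : Int)
    (hpos : 0 < length) (hle : length ≤ (cs.length : Int))
    (h0 : 0 ≤ i) (hib : i < (cs.length : Int) - length)
    (acc : List Char) (hacc : acc.length = length.toNat) :
    lrcInner acc
        (length - ((PySem.List.slice cs (some i) (some (min (i + length) ((cs.length : Int) - length)))).length : Int))
        (PySem.List.slice cs (some i) (some (min (i + length) ((cs.length : Int) - length))))
      = comb acc (blockA cs ((cs.length : Int) - length) length i) := by
  by_cases hcase : i ≤ ((cs.length : Int) - length) - length
  · have hmin : min (i + length) ((cs.length : Int) - length) = i + length := by omega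
    rw [hmin]
    have hblen : (PySem.List.slice cs (some i) (some (i + length))).length = length.toNat := by
      rw [PySem.List.slice_toNat cs h0 (by omega)]
      simp only [List.length_take, List.length_drop]
      omega
    rw [hblen]
    have hz : length - (length.toNat : Int) = 0 := by omega
    rw [hz]
    have := lrcInner_eq (PySem.List.slice cs (some i) (some (i + length))) [] acc
      (by rw [hblen, hacc])
    simpa [blockA, hcase] using this
  · have hmin : min (i + length) ((cs.length : Int) - length) = (cs.length : Int) - length := by omega
    rw [hmin]
    set buffer := (cs.length : Int) - length with hbuf
    set block := PySem.List.slice cs (some i) (some buffer) with hblock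
    have hblen : block.length = (buffer - i).toNat := by
      rw [hblock, PySem.List.slice_toNat cs h0 (by omega)]
      simp only [List.length_take, List.length_drop]
      omega
    have hofft : (length - (block.length : Int)).toNat ≤ acc.length := by
      rw [hacc]; omega
    set pre := acc.take (length - (block.length : Int)).toNat with hpre
    set suf := acc.drop (length - (block.length : Int)).toNat with hsuf
    have hprelen : pre.length = (length - (block.length : Int)).toNat := by
      rw [hpre]; simp; omega
    have hsuflen : suf.length = block.length := by
      rw [hsuf]; simp only [List.length_drop]; omega
    have hsplit : acc = pre ++ suf := (List.take_append_drop _ acc).symm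
    have hcast : ((pre.length : Nat) : Int) = length - (block.length : Int) := by
      rw [hprelen]; omega
    have h1 : lrcInner acc (length - (block.length : Int)) block = pre ++ comb suf block := by
      rw [hsplit, ← hcast]
      exact lrcInner_eq block pre suf hsuflen
    have h2 : blockA cs buffer length i = List.replicate pre.length '0' ++ block := by
      unfold blockA
      rw [if_neg (by omega)]
      rw [PySem.List.pyRepeat_singleton, ← hblock]
      congr 2
      omega
    rw [h1, h2, hsplit, comb_pad]

lemma foldB_eq_comb (cs : List Char) (length : Int)
    (hpos : 0 < length) (hle : length ≤ (cs.length : Int)) :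
    ∀ (l : List Int), (∀ i ∈ l, 0 ≤ i ∧ i < (cs.length : Int) - length) →
      ∀ acc : List Char, acc.length = length.toNat →
        l.foldl (fun acc i =>
            lrcInner acc
              (length - ((PySem.List.slice cs (some i) (some (min (i + length) ((cs.length : Int) - length)))).length : Int))
              (PySem.List.slice cs (some i) (some (min (i + length) ((cs.length : Int) - length))))) acc
          = (l.map (blockA cs ((cs.length : Int) - length) length)).foldl comb acc := by
  intro l
  induction l with
  | nil => intro _ acc _; rfl
  | cons i t ih =>
    intro hmem acc hacc
    obtain ⟨h0, hib⟩ := hmem i (by simp)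
    simp only [List.foldl_cons, List.map_cons]
    rw [stepB_eq_comb cs length i hpos hle h0 hib acc hacc]
    exact ih (fun j hj => hmem j (by simp [hj])) _
      (by rw [length_comb _ _ (by rw [blockA_length cs length i hpos hle h0 hib, hacc]), hacc])

lemma k_of_count (c : Nat) :
    (if PySem.Int.mod (0 + (c : Int)) 2 = 0 then '0' else '1') = (if Odd c then '1' else '0') := by
  rw [zero_add]
  have h2 : PySem.Int.mod (c : Int) 2 = ((c % 2 : Nat) : Int) := by
    exact_mod_cast PySem.Int.mod_natCast c 2
  by_cases hodd : Odd c
  · rw [if_pos hodd, if_neg (by rw [h2, Nat.odd_iff.mp hodd]; simp)]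
  · rw [if_neg hodd, if_pos (by rw [h2, Nat.even_iff.mp (Nat.not_odd_iff_even.mp hodd)]; simp)]

lemma all_pyRange_iff (b : Int) (f : Int → Bool) :
    (PySem.List.pyRange 0 b 1).all f = true ↔ ∀ p : Nat, p < b.toNat → f (p : Int) = true := by
  rw [List.all_eq_true]
  constructor
  · intro h p hp
    exact h _ (PySem.List.mem_pyRange_one.mpr ⟨by omega, by omega⟩)
  · intro h x hx
    obtain ⟨hx0, hxb⟩ := PySem.List.mem_pyRange_one.mp hx
    have := h x.toNat (by omega)
    rwa [Int.toNat_of_nonneg hx0] at this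

lemma list_eq_iff_getD (xs ys : List Char) (hlen : xs.length = ys.length) :
    xs = ys ↔ ∀ p : Nat, p < xs.length → xs.getD p '?' = ys.getD p '?' := by
  constructor
  · intro h p hp; rw [h]
  · intro h
    apply List.ext_getElem hlen
    intro p hp1 hp2
    have := h p hp1
    rwa [List.getD_eq_getElem _ _ hp1, List.getD_eq_getElem _ _ hp2] at this

lemma main_regime_M (codeword : String) (length : Int)
    (hpos : 0 < length) (hle : length ≤ (codeword.toList.length : Int)) :
    lrc_decoding codeword length = lrc_decoding_alt codeword length := by
  have hmemR : ∀ i ∈ PySem.List.pyRange 0 ((codeword.toList.length : Int) - length) length,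
      0 ≤ i ∧ i < (codeword.toList.length : Int) - length := by
    intro i hi
    have := (PySem.List.mem_pyRange_iff_of_pos hpos i).mp hi
    exact ⟨this.1, this.2.1⟩
  have hmax : max length 0 = length := max_eq_left (by omega)
  unfold lrc_decoding lrc_decoding_alt
  simp only []
  rw [lrcBuild_eq]
  simp only []
  rw [lrcCheck_eq, hmax, PySem.List.pyRepeat_singleton,
      foldB_eq_comb codeword.toList length hpos hle _ hmemR _ (by simp)]
  set CS := codeword.toList with hCS
  set R := PySem.List.pyRange 0 ((CS.length : Int) - length) length with hR
  set DATA := List.map (blockA CS ((CS.length : Int) - length) length) R with hDATA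
  set PAR := PySem.List.slice CS (some ((CS.length : Int) - length)) (some (CS.length : Int)) with hPAR
  -- parity block is the tail slice, of length `length`
  have hpar : PAR = CS.drop ((CS.length : Int) - length).toNat := by
    rw [hPAR, slice_eq, clamp_big CS.length (CS.length : Int) (by omega),
        clamp_nonneg CS.length ((CS.length : Int) - length) (by omega) (by omega)]
    rw [List.take_of_length_le (by simp)]
  have hparlen : PAR.length = length.toNat := by
    rw [hpar]; simp; omega
  rw [if_neg (show ¬((PAR.length : Int) ≠ length) from by rw [hparlen]; omega)]
  -- all blocks have length `length`
  have hblk : ∀ blk ∈ DATA, blk.length = length.toNat := by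
    intro blk hb
    obtain ⟨i, hi, rfl⟩ := List.mem_map.mp (hDATA ▸ hb)
    obtain ⟨h0, hib⟩ := hmemR i hi
    exact blockA_length CS length i hpos hle h0 hib
  -- the XOR fold computes each column parity
  obtain ⟨hflen, hfval0⟩ := foldl_comb_spec DATA (List.replicate length.toNat '0')
    (by intro blk hb; rw [List.length_replicate]; exact hblk blk hb)
    (by intro q hq; left; exact List.getD_replicate _ (by simpa using hq))
  rw [List.length_replicate] at hflen
  have hval : ∀ p : Nat, p < length.toNat →
      (DATA.foldl comb (List.replicate length.toNat '0')).getD p '?' =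
        (if Odd (DATA.countP (fun blk => decide (blk.getD p '?' = '1'))) then '1' else '0') := by
    intro p hp
    rw [hfval0 p (by simpa using hp), List.getD_replicate _ (by simpa using hp)]
    rfl
  -- A's inner counting loop is countP
  have hnum : ((R.length : Nat) : Int) = ((DATA.length : Nat) : Int) := by
    rw [hDATA]; simp
  rw [hnum]
  have hfun : ∀ i : Int,
      ((PySem.List.pyRange 0 ((DATA.length : Nat) : Int) 1).foldl
        (fun one j => if PySem.List.pyGetD (PySem.List.pyGetD DATA j []) i '?' = '1' then one + 1 else one) 0)
      = 0 + ((DATA.countP (fun blk => decide (PySem.List.pyGetD blk i '?' = '1')) : Nat) : Int) := by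
    intro i
    rw [PySem.List.foldl_pyRange_zero_pyGetD' DATA []
      (fun one blk => if PySem.List.pyGetD blk i '?' = '1' then one + 1 else one) 0]
    exact PySem.List.foldl_ite_add_one _ _ _
  simp only [hfun, k_of_count]
  -- both conditions are the same pointwise statement
  refine if_congr ?_ rfl rfl
  rw [all_pyRange_iff, list_eq_iff_getD _ _ (by rw [hflen, hparlen])]
  have hpred : ∀ p : Nat,
      (fun blk => decide (PySem.List.pyGetD blk ((p : Nat) : Int) '?' = '1')) =
      (fun blk : List Char => decide (blk.getD p '?' = '1')) := by
    intro p; funext blk; rw [PySem.List.pyGetD_natCast]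
  constructor
  · intro h p hp
    rw [hflen] at hp
    rw [hval p hp]
    have := h p hp
    rw [decide_eq_true_eq, PySem.List.pyGetD_natCast, hpred p] at this
    exact this.symm
  · intro h p hp
    rw [decide_eq_true_eq, PySem.List.pyGetD_natCast, hpred p]
    have := h p (by rw [hflen]; exact hp)
    rw [hval p hp] at this
    exact this.symm

lemma main_regime_H (codeword : String) (length : Int)
    (hpos : 0 < length) (hgt : (codeword.toList.length : Int) < length)
    (hex : ∃ c ∈ codeword.toList.drop (2 * codeword.toList.length - length).toNat, c ≠ '0') :
    lrc_decoding codeword length = "error" ∧ lrc_decoding_alt codeword length = "error" := by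
  set cs := codeword.toList with hcs
  set nn : Int := (cs.length : Int) with hnn
  set k : Nat := (2 * nn - length).toNat with hk
  have hclamp : PySem.List.clampIdx cs.length (nn - length) = k := by
    rw [clamp_neg _ _ (by omega)]; omega
  have hpar : PySem.List.slice cs (some (nn - length)) (some nn) = cs.drop k := by
    rw [slice_eq, hclamp, clamp_big _ _ (by omega)]
    rw [List.take_of_length_le (by simp)]
  have hplen : (cs.drop k).length = cs.length - k := by simp
  obtain ⟨c, hc, hcne⟩ := hex
  obtain ⟨q, hq, hqc⟩ := List.mem_iff_getElem.mp hc
  have hqlen : q < cs.length - k := by rw [hplen] at hq; omega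
  constructor
  · unfold lrc_decoding lrcBuild
    simp only []
    rw [← hcs, ← hnn]
    rw [pyRange_pos_step_nil hpos (by omega : nn - length ≤ 0)]
    simp only [List.foldl_nil]
    rw [lrcCheck_eq, hpar]
    have hall : (PySem.List.pyRange 0 length 1).all (fun i =>
        PySem.List.pyGetD (cs.drop k) i '?' =
          (if PySem.Int.mod ((PySem.List.pyRange 0 0 1).foldl
              (fun one j => if PySem.List.pyGetD (PySem.List.pyGetD [] j []) i '?' = '1' then one + 1 else one) 0) 2 = 0
           then '0' else '1')) = false := by
      rw [List.all_eq_false]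
      refine ⟨(q : Int), PySem.List.mem_pyRange_one.mpr ⟨by omega, by omega⟩, ?_⟩
      rw [PySem.List.pyRange_one_eq_nil le_rfl]
      simp only [List.foldl_nil]
      simp only [show PySem.Int.mod 0 2 = (0:Int) from by decide, reduceIte]
      rw [PySem.List.pyGetD_natCast]
      rw [List.getD_eq_getElem _ _ (by omega), hqc]
      simp [hcne]
    rw [hall]
    simp
  · unfold lrc_decoding_alt
    simp only []
    rw [← hcs, ← hnn, hpar]
    rw [if_pos (by rw [hplen, show max length 0 = length from by omega]; omega)]

lemma main_regime_N (codeword : String) (length : Int) (hneg : length < 0) :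
    lrc_decoding codeword length = "correct" ∧ lrc_decoding_alt codeword length = "correct" := by
  constructor
  · unfold lrc_decoding
    simp only []
    rw [lrcCheck_eq, PySem.List.pyRange_one_eq_nil (by omega : length ≤ (0:Int))]
    rfl
  · unfold lrc_decoding_alt
    simp only []
    have hpar : PySem.List.slice codeword.toList (some ((codeword.toList.length : Int) - length))
        (some (codeword.toList.length : Int)) = [] := by
      rw [slice_eq, clamp_big _ _ (by omega), clamp_big _ _ (by omega)]
      simp
    rw [hpar, pyRange_neg_step_nil hneg (by omega : (0:Int) ≤ (codeword.toList.length : Int) - length)]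
    simp only [List.foldl_nil]
    rw [if_neg (by simp; omega)]
    rw [show max length 0 = 0 from by omega, PySem.List.pyRepeat_singleton]
    simp

-- ===== VERDICT (by name: the statement is the Claim_ definition above) =====
theorem lrc_decoding_spec : Claim_equal_lrc_decoding := by
  intro codeword length _ hpre
  unfold Spec_lrc_decoding
  obtain ⟨hne, hdom⟩ := hpre
  rcases lt_trichotomy length 0 with hneg | hzero | hpos
  · obtain ⟨hA, hB⟩ := main_regime_N codeword length hneg
    rw [hA, hB]
  · exact absurd hzero hne
  · rcases le_or_gt length (codeword.toList.length : Int) with hle | hgt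
    · exact main_regime_M codeword length hpos hle
    · have hex : ∃ c ∈ codeword.toList.drop (2 * codeword.toList.length - length).toNat, c ≠ '0' := by
        rcases hdom with h | h
        · omega
        · obtain ⟨c, hc, hne⟩ := List.any_eq_true.mp h
          exact ⟨c, hc, bne_iff_ne.mp hne⟩
      obtain ⟨hA, hB⟩ := main_regime_H codeword length hpos hgt hex
      rw [hA, hB]
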